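-- pv_equiv track=rewrite | github.com/zhmu/x86box | test/alu.py | my_rcl
-- ===== SOURCE A (Python) =====
-- CF = (1 << 0)
--
-- OF = (1 << 11)
--
-- def set_flag(fl, on, flag):
--     if on:
--         fl = fl | flag
--     else:
--         fl = fl & ~flag
--     return fl
--
-- def my_rcl(a, cnt, initial_flags):
--     cnt = cnt & 0x1f
--
--     cf = 1 if (initial_flags & CF) else 0
--     new_fl = initial_flags
--     res = a
--     for _ in range(0, cnt):
--         temp_cf = 1 if (res & 0x80) != 0 else 0
--         res = ((res << 1) + cf) & 0xff
--         cf = temp_cf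
--
--     if cnt > 0:
--         # OF is undefined if != 1, but it is set anyway
--         new_fl = set_flag(new_fl, (a & 0x80) ^ (res & 0x80), OF)
--
--     new_fl = set_flag(new_fl, cf, CF)
--     return (res, new_fl)
-- ===== SOURCE B (Python) =====
-- CF = (1 << 0)
--
-- OF = (1 << 11)
--
-- def my_rcl(a, cnt, initial_flags):
--     n = cnt & 0x1f
--     if n == 0:
--         return (a, initial_flags)
--     cf = initial_flags & CF
--     r = n % 9
--     val = (a & 0xff) | (cf << 8)
--     val = ((val << r) | (val >> (9 - r))) & 0x1ff
--     res = val & 0xff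
--     new_cf = val >> 8
--     new_fl = initial_flags
--     if (a & 0x80) ^ (res & 0x80):
--         new_fl |= OF
--     else:
--         new_fl &= ~OF
--     if new_cf:
--         new_fl |= CF
--     else:
--         new_fl &= ~CF
--     return (res, new_fl)
-- ===== Notes on version B (the rewrite author's own statement) =====
-- stated objective: faster
-- what changed: Replaces A's per-bit rotate-through-carry loop (up to 31 shift/mask iterations) by a single O(1) 9-bit barrel rotation of the carry-extended value (val = (a&0xff)|(cf<<8), rotated by cnt%9), with the identical OF/CF flag updates.
import Mathlib
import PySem

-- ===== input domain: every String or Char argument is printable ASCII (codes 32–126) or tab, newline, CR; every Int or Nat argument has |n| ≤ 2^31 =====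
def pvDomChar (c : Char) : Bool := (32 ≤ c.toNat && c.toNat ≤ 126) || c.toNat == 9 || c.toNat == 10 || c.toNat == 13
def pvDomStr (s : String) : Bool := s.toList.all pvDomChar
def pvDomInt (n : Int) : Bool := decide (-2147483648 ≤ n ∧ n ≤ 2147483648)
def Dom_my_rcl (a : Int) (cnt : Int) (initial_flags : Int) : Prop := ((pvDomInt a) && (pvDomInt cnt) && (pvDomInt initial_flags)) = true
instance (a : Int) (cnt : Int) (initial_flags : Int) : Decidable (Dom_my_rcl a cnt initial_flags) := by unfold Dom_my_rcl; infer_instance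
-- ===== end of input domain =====

-- B replaces A's per-bit rotate loop by a single 9-bit barrel rotation (shift/or on the
-- carry-extended value) with the same flag updates; objective: a constant-factor faster O(1) formula.

-- ===== PORT A =====
-- CF = 1, OF = 2048 are inlined as literals.
def pv_set_flag (fl : Int) (on : Int) (flag : Int) : Int :=
  if on ≠ 0 then PySem.Int.bor fl flag else PySem.Int.band fl (Int.not flag)

def my_rcl (a : Int) (cnt : Int) (initial_flags : Int) : Int × Int :=
  let cnt2 := PySem.Int.band cnt 31
  let cf : Int := if PySem.Int.band initial_flags 1 ≠ 0 then 1 else 0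
  let new_fl := initial_flags
  let p := (PySem.List.pyRange 0 cnt2 1).foldl
    (fun (s : Int × Int) (_ : Int) =>
      let temp_cf : Int := if PySem.Int.band s.1 128 ≠ 0 then 1 else 0
      (PySem.Int.band ((s.1 <<< (1 : Nat)) + s.2) 255, temp_cf)) (a, cf)
  let new_fl := if cnt2 > 0 then
      pv_set_flag new_fl (PySem.Int.bxor (PySem.Int.band a 128) (PySem.Int.band p.1 128)) 2048
    else new_fl
  let new_fl := pv_set_flag new_fl p.2 1
  (p.1, new_fl)

-- ===== PORT B =====
-- shift counts r and 9-r are nonnegative (r = n % 9 with n ≥ 0), so .toNat is exact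
def my_rcl_alt (a : Int) (cnt : Int) (initial_flags : Int) : Int × Int :=
  let n := PySem.Int.band cnt 31
  if n = 0 then (a, initial_flags)
  else
    let cf := PySem.Int.band initial_flags 1
    let r := PySem.Int.mod n 9
    let val := PySem.Int.bor (PySem.Int.band a 255) (cf <<< (8 : Nat))
    let val2 := PySem.Int.band (PySem.Int.bor (val <<< r.toNat) (val >>> (9 - r.toNat))) 511
    let res := PySem.Int.band val2 255
    let new_cf := val2 >>> (8 : Nat)
    let f1 := if PySem.Int.bxor (PySem.Int.band a 128) (PySem.Int.band res 128) ≠ 0 then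
        PySem.Int.bor initial_flags 2048
      else PySem.Int.band initial_flags (Int.not 2048)
    let f2 := if new_cf ≠ 0 then PySem.Int.bor f1 1 else PySem.Int.band f1 (Int.not 1)
    (res, f2)

-- ===== PRECONDITION & SPEC =====
def Spec_my_rcl (a : Int) (cnt : Int) (initial_flags : Int) (out : Int × Int) : Prop := out = my_rcl_alt a cnt initial_flags
instance (a : Int) (cnt : Int) (initial_flags : Int) (out : Int × Int) : Decidable (Spec_my_rcl a cnt initial_flags out) := by unfold Spec_my_rcl; infer_instance

-- ===== CLAIM (what is proved, stated in full; the proofs are below) =====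
def Claim_equal_my_rcl : Prop := ∀ (a : Int) (cnt : Int) (initial_flags : Int), Dom_my_rcl a cnt initial_flags → Spec_my_rcl a cnt initial_flags (my_rcl a cnt initial_flags)

-- ===== LEMMAS AND PROOFS =====

-- Nat-level mask facts
lemma pv_natAnd255 (n : Nat) : n &&& 255 = n % 256 := by
  have := Nat.and_two_pow_sub_one_eq_mod n 8; norm_num at this; exact this

lemma pv_natAnd31 (n : Nat) : n &&& 31 = n % 32 := by
  have := Nat.and_two_pow_sub_one_eq_mod n 5; norm_num at this; exact this

lemma pv_natAnd128 (n : Nat) : n &&& 128 = (if n / 128 % 2 = 1 then 128 else 0) := by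
  have h := Nat.and_two_pow n 7
  norm_num at h
  rw [h, Nat.testBit_eq_decide_div_mod_eq]
  norm_num
  split_ifs <;> simp_all

lemma pv_natOr1 (n : Nat) : n ||| 1 = n - n % 2 + 1 := by
  conv_lhs => rw [show n = (n / 2) <<< 1 + n % 2 by simp [Nat.shiftLeft_eq]; omega]
  rw [Nat.shiftLeft_add_eq_or_of_lt (by omega), Nat.or_assoc]
  have h1 : n % 2 ||| 1 = 1 := by rcases Nat.mod_two_eq_zero_or_one n with h | h <;> rw [h] <;> rfl
  rw [h1, ← Nat.shiftLeft_add_eq_or_of_lt (by norm_num : (1:Nat) < 2 ^ 1)]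
  simp [Nat.shiftLeft_eq]; omega

-- Int-level characterisations of the bit operations the ports use
lemma pv_mask255 (a : Int) : PySem.Int.band a 255 = a % 256 := by
  unfold PySem.Int.band
  split_ifs with h1 h2 h3 <;> norm_num at *
  · rw [show ((255:Int)).toNat = 255 from rfl, pv_natAnd255]; omega
  · rw [show ((255:Int)).toNat = 255 from rfl, Nat.and_comm, pv_natAnd255]; omega

lemma pv_mask31 (a : Int) : PySem.Int.band a 31 = a % 32 := by
  unfold PySem.Int.band
  split_ifs with h1 h2 h3 <;> norm_num at *
  · rw [show ((31:Int)).toNat = 31 from rfl, pv_natAnd31]; omega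
  · rw [show ((31:Int)).toNat = 31 from rfl, Nat.and_comm, pv_natAnd31]; omega

lemma pv_band128 (a : Int) : PySem.Int.band a 128 = a % 256 - a % 128 := by
  unfold PySem.Int.band
  split_ifs with h1 h2 h3 <;> norm_num at *
  · rw [show ((128:Int)).toNat = 128 from rfl, pv_natAnd128]; split_ifs <;> omega
  · rw [show ((128:Int)).toNat = 128 from rfl, Nat.and_comm, pv_natAnd128]; split_ifs <;> omega

lemma pv_bor1 (a : Int) : PySem.Int.bor a 1 = a - a % 2 + 1 := by
  unfold PySem.Int.bor
  split_ifs with h1 h2 h3 <;> norm_num at *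
  · rw [pv_natOr1]; omega
  · omega

lemma pv_bandNot1 (a : Int) : PySem.Int.band a (Int.not 1) = a - a % 2 := by
  rw [show Int.not 1 = -2 from rfl]
  unfold PySem.Int.band
  split_ifs with h1 h2 h3 <;> norm_num at *
  · omega
  · rw [pv_natOr1]; omega

lemma pv_c0 (fl : Int) : (if PySem.Int.band fl 1 ≠ 0 then (1:Int) else 0) = PySem.Int.band fl 1 := by
  rw [PySem.Int.band_one, PySem.Int.mod_eq_emod_of_pos (by norm_num : (0:Int) < 2)]
  split_ifs with h <;> omega

lemma pv_setflag_cf_self (fl : Int) : pv_set_flag fl (PySem.Int.band fl 1) 1 = fl := by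
  unfold pv_set_flag
  rw [PySem.Int.band_one, PySem.Int.mod_eq_emod_of_pos (by norm_num : (0:Int) < 2)]
  split_ifs with h
  · rw [pv_bor1]; omega
  · rw [pv_bandNot1]; omega

-- A's loop body / B's rotate core as named functions (proof-side only)
def pvStep (s : Int × Int) : Int × Int :=
  (PySem.Int.band ((s.1 <<< (1 : Nat)) + s.2) 255, if PySem.Int.band s.1 128 ≠ 0 then 1 else 0)

def pvB (x c k : Int) : Int × Int :=
  let r := PySem.Int.mod k 9
  let val := PySem.Int.bor x (c <<< (8 : Nat))
  let val2 := PySem.Int.band (PySem.Int.bor (val <<< r.toNat) (val >>> (9 - r.toNat))) 511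
  (PySem.Int.band val2 255, val2 >>> (8 : Nat))

set_option maxHeartbeats 4000000 in
set_option maxRecDepth 100000 in
lemma pv_core : ∀ (x : Fin 256) (c : Fin 2) (k : Fin 32),
    pvStep^[k.val] ((x.val : Int), (c.val : Int)) = pvB x.val c.val k.val := by decide

lemma pv_core' (x c k : Int) (hx0 : 0 ≤ x) (hx : x < 256) (hc0 : 0 ≤ c) (hc : c < 2)
    (hk0 : 0 ≤ k) (hk : k < 32) : pvStep^[k.toNat] (x, c) = pvB x c k := by
  have h := pv_core ⟨x.toNat, by omega⟩ ⟨c.toNat, by omega⟩ ⟨k.toNat, by omega⟩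
  simpa [Int.toNat_of_nonneg hx0, Int.toNat_of_nonneg hc0, Int.toNat_of_nonneg hk0] using h

lemma pv_step_absorb (a c : Int) : pvStep (a, c) = pvStep (a % 256, c) := by
  unfold pvStep
  have h : (PySem.Int.band a 128 ≠ 0) ↔ (PySem.Int.band (a % 256) 128 ≠ 0) := by
    rw [pv_band128, pv_band128]; omega
  simp only [pv_mask255, Int.shiftLeft_eq, h]
  norm_num
  omega

lemma pv_iterate_absorb (a c : Int) (m : Nat) (hm : 1 ≤ m) :
    pvStep^[m] (a, c) = pvStep^[m] (a % 256, c) := by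
  obtain ⟨m', rfl⟩ : ∃ m', m = m' + 1 := ⟨m - 1, by omega⟩
  rw [show m' + 1 = Nat.succ m' from rfl, Function.iterate_succ_apply,
    Function.iterate_succ_apply, pv_step_absorb]

lemma pv_foldl_const {α : Type} (l : List α) (init : Int × Int) :
    List.foldl (fun s _ => pvStep s) init l = pvStep^[l.length] init := by
  induction l generalizing init with
  | nil => rfl
  | cons x xs ih =>
    rw [List.foldl_cons, List.length_cons, show xs.length + 1 = Nat.succ xs.length from rfl,
      Function.iterate_succ_apply, ih]

lemma pv_A_loop (a c : Int) (m : Nat) :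
    (PySem.List.pyRange 0 (m : Int) 1).foldl
      (fun (s : Int × Int) (_ : Int) =>
        (PySem.Int.band ((s.1 <<< (1 : Nat)) + s.2) 255,
          if PySem.Int.band s.1 128 ≠ 0 then 1 else 0)) (a, c)
    = pvStep^[m] (a, c) := by
  rw [show (fun (s : Int × Int) (_ : Int) =>
        (PySem.Int.band ((s.1 <<< (1 : Nat)) + s.2) 255,
          if PySem.Int.band s.1 128 ≠ 0 then (1:Int) else 0))
      = (fun (s : Int × Int) (_ : Int) => pvStep s) from rfl]
  rw [PySem.List.pyRange_zero_natCast, List.foldl_map, pv_foldl_const, List.length_range]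

-- ===== VERDICT (by name: the statement is the Claim_ definition above) =====
theorem my_rcl_spec : Claim_equal_my_rcl := by
  intro a cnt fl _
  unfold Spec_my_rcl my_rcl my_rcl_alt
  simp only [pv_mask31, pv_c0]
  by_cases h0 : cnt % 32 = 0
  · rw [if_pos h0, h0]
    rw [show PySem.List.pyRange 0 0 1 = [] from rfl]
    simp only [List.foldl_nil]
    rw [if_neg (by omega : ¬ (0:Int) > 0), pv_setflag_cf_self]
  · rw [if_neg h0]
    have hb : 0 ≤ cnt % 32 ∧ cnt % 32 < 32 := by omega
    obtain ⟨m, hm⟩ : ∃ m : Nat, (m : Int) = cnt % 32 := ⟨(cnt % 32).toNat, by omega⟩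
    have hm1 : 1 ≤ m := by omega
    rw [← hm, pv_A_loop, pv_iterate_absorb a _ m hm1]
    have hcb : 0 ≤ PySem.Int.band fl 1 ∧ PySem.Int.band fl 1 < 2 := by
      rw [PySem.Int.band_one, PySem.Int.mod_eq_emod_of_pos (by norm_num : (0:Int) < 2)]; omega
    have hcore := pv_core' (a % 256) (PySem.Int.band fl 1) (m : Int)
      (by omega) (by omega) hcb.1 hcb.2 (by omega) (by omega)
    rw [Int.toNat_natCast] at hcore
    rw [hcore, pv_mask255 a]
    rw [if_pos (by omega : (m : Int) > 0)]
    unfold pvB pv_set_flag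
    rfl
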